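-- pv_equiv track=rewrite | github.com/angadhn/botference | core/botference_agent.py | truncate_result
-- ===== SOURCE A (Python) =====
-- def truncate_result(result: str, limit: int = 50000) -> str:
--     """Truncate tool results while preserving complete lines/JSON entries.
--
--     If the result exceeds `limit` chars, keep complete lines from the start
--     up to the limit, then append a summary of what was dropped.
--     """
--     if len(result) <= limit:
--         return result
--
--     total_chars = len(result)
--     lines = result.split("\n")
--     total_lines = len(lines)
--
--     kept = []
--     kept_chars = 0
--     kept_count = 0
--
--     for line in lines:
--         # +1 for the newline we'll rejoin with
--         if kept_chars + len(line) + 1 > limit: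
--             break
--         kept.append(line)
--         kept_chars += len(line) + 1
--         kept_count += 1
--
--     # If even the first line exceeds the limit, keep it truncated
--     if not kept:
--         kept.append(lines[0][:limit])
--         kept_count = 1
--
--     dropped = total_lines - kept_count
--     summary = (
--         f"\n\n[truncated: kept {kept_count} of {total_lines} lines, "
--         f"{kept_chars} of {total_chars} chars — {dropped} lines dropped]"
--     )
--     return "\n".join(kept) + summary
-- ===== SOURCE B (Python) =====
-- def truncate_result(result: str, limit: int = 50000) -> str:
--     """Truncate tool results while preserving complete lines/JSON entries.
--
--     Alternative implementation: build a cumulative table of line costs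
--     (len(line)+1 for the rejoining newline) in one pass, then the number of
--     whole lines that fit is just the number of table entries <= limit.
--     """
--     if len(result) <= limit:
--         return result
--
--     total_chars = len(result)
--     lines = result.split("\n")
--     total_lines = len(lines)
--
--     prefix = []
--     acc = 0
--     for line in lines:
--         acc += len(line) + 1
--         prefix.append(acc)
--
--     # prefix is strictly increasing, so the lines that fit are exactly
--     # those whose cumulative cost is <= limit
--     kept_count = sum(1 for p in prefix if p <= limit)
--
--     if kept_count:
--         kept = lines[:kept_count]
--         kept_chars = prefix[kept_count - 1]
--     else:
--         # even the first line exceeds the limit: keep it truncated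
--         kept = [lines[0][:limit]]
--         kept_count = 1
--         kept_chars = 0
--
--     dropped = total_lines - kept_count
--     summary = (
--         f"\n\n[truncated: kept {kept_count} of {total_lines} lines, "
--         f"{kept_chars} of {total_chars} chars — {dropped} lines dropped]"
--     )
--     return "\n".join(kept) + summary
-- ===== Notes on version B (the rewrite author's own statement) =====
-- stated objective: alternative
-- what changed: A's single scan-and-break loop that accumulates the kept lines and a running character count is replaced by building a cumulative line-cost table in one pass, counting the table entries <= limit to get kept_count directly, and slicing lines[:kept_count] with kept_chars read off the table.
import Mathlib
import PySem

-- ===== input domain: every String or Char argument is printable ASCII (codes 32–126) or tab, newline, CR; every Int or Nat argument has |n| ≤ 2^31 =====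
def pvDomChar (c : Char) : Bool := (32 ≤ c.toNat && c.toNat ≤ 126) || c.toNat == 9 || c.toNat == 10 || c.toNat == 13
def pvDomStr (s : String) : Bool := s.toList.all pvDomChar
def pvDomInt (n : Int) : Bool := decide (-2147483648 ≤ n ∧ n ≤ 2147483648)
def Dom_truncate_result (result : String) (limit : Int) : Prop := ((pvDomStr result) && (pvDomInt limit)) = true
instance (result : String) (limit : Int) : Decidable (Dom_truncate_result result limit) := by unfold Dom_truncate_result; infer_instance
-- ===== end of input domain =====

-- B replaces A's scan-and-break loop by a cumulative line-cost table plus a count of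
-- entries ≤ limit (objective: alternative decomposition, same asymptotic cost).

-- ===== PORT A =====
-- the for-loop with break: returns (kept, kept_chars, kept_count); kc is the running kept_chars
def truncAux (limit : Int) : List String → Int → (List String × Int × Int)
  | [], kc => ([], kc, 0)
  | l :: rest, kc =>
    if kc + PySem.Str.len l + 1 > limit then ([], kc, 0)
    else
      let r := truncAux limit rest (kc + PySem.Str.len l + 1)
      (l :: r.1, r.2.1, r.2.2 + 1)

def truncate_result (result : String) (limit : Int) : String :=
  if PySem.Str.len result ≤ limit then result
  else
    let total_chars := PySem.Str.len result
    -- result.split("\n"): sep ≠ "" so split? always returns some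
    let lines := (PySem.Str.split? result "\n").getD []
    let total_lines : Int := lines.length
    let r := truncAux limit lines 0
    let kept := r.1
    let kept_chars := r.2.1
    -- 'if not kept: kept.append(lines[0][:limit]); kept_count = 1' — lines[0] as headD;
    -- exact since split? never yields [] (a possible IndexError is unreachable)
    let kc2 := if kept = [] then
        ([PySem.Str.slice (lines.headD "") none (some limit)], (1 : Int))
      else (kept, r.2.2)
    let dropped := total_lines - kc2.2
    PySem.Str.join "\n" kc2.1 ++
      ("\n\n[truncated: kept " ++ PySem.Int.toStr kc2.2 ++ " of " ++ PySem.Int.toStr total_lines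
        ++ " lines, " ++ PySem.Int.toStr kept_chars ++ " of " ++ PySem.Int.toStr total_chars
        ++ " chars — " ++ PySem.Int.toStr dropped ++ " lines dropped]")

-- ===== PORT B =====
-- the prefix-table loop: foldl carrying (prefix, acc)
def altPrefix (lines : List String) : List Int × Int :=
  lines.foldl (fun st line =>
    let acc := st.2 + PySem.Str.len line + 1
    (st.1 ++ [acc], acc)) ([], 0)

def truncate_result_alt (result : String) (limit : Int) : String :=
  if PySem.Str.len result ≤ limit then result
  else
    let total_chars := PySem.Str.len result
    let lines := (PySem.Str.split? result "\n").getD []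
    let total_lines : Int := lines.length
    let pref := (altPrefix lines).1
    -- kept_count = sum(1 for p in prefix if p <= limit)
    let kc : Int := pref.foldl (fun n p => if p ≤ limit then n + 1 else n) 0
    -- (kept, kept_count, kept_chars); prefix[kept_count - 1] is in range (1 ≤ kc ≤ len prefix)
    let t := if kc ≠ 0 then
        (PySem.List.slice lines none (some kc), kc, PySem.List.pyGetD pref (kc - 1) 0)
      else ([PySem.Str.slice (lines.headD "") none (some limit)], (1 : Int), (0 : Int))
    let dropped := total_lines - t.2.1
    PySem.Str.join "\n" t.1 ++
      ("\n\n[truncated: kept " ++ PySem.Int.toStr t.2.1 ++ " of " ++ PySem.Int.toStr total_lines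
        ++ " lines, " ++ PySem.Int.toStr t.2.2 ++ " of " ++ PySem.Int.toStr total_chars
        ++ " chars — " ++ PySem.Int.toStr dropped ++ " lines dropped]")

-- ===== PRECONDITION & SPEC =====
def Spec_truncate_result (result : String) (limit : Int) (out : String) : Prop := out = truncate_result_alt result limit
instance (result : String) (limit : Int) (out : String) : Decidable (Spec_truncate_result result limit out) := by unfold Spec_truncate_result; infer_instance

-- ===== CLAIM (what is proved, stated in full; the proofs are below) =====
def Claim_equal_truncate_result : Prop := ∀ (result : String) (limit : Int), Dom_truncate_result result limit → Spec_truncate_result result limit (truncate_result result limit)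

-- ===== LEMMAS AND PROOFS =====

theorem strLen_nonneg (s : String) : 0 ≤ PySem.Str.len s := by simp [PySem.Str.len_eq]

-- proof-side accumulate: the prefix table from base c
def pfx (c : Int) : List String → List Int
  | [] => []
  | l :: rest => (c + PySem.Str.len l + 1) :: pfx (c + PySem.Str.len l + 1) rest

theorem pfx_length (lines : List String) : ∀ c : Int, (pfx c lines).length = lines.length := by
  induction lines with
  | nil => intro c; rfl
  | cons l r ih => intro c; simp [pfx, ih]

theorem altPrefix_eq_pfx_aux (lines : List String) : ∀ (p : List Int) (c : Int),
    (lines.foldl (fun st line =>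
      let acc := st.2 + PySem.Str.len line + 1
      (st.1 ++ [acc], acc)) (p, c)).1 = p ++ pfx c lines := by
  induction lines with
  | nil => intro p c; simp [pfx]
  | cons l rest ih =>
    intro p c
    simp only [List.foldl_cons, pfx]
    rw [ih]
    simp

theorem altPrefix_eq_pfx (lines : List String) : (altPrefix lines).1 = pfx 0 lines := by
  simpa using altPrefix_eq_pfx_aux lines [] 0

theorem mem_pfx_gt {c p : Int} {lines : List String} (h : p ∈ pfx c lines) : c < p := by
  induction lines generalizing c with
  | nil => simp [pfx] at h
  | cons l rest ih =>
    simp only [pfx, List.mem_cons] at h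
    rcases h with h | h
    · have := strLen_nonneg l; omega
    · have := ih h; have := strLen_nonneg l; omega

theorem count_of_all_gt (limit : Int) (ps : List Int) (h : ∀ p ∈ ps, limit < p) :
    ∀ n : Int, ps.foldl (fun n p => if p ≤ limit then n + 1 else n) n = n := by
  induction ps with
  | nil => intro n; simp
  | cons q t ih =>
    intro n
    have hq : limit < q := h q (by simp)
    simp only [List.foldl_cons, if_neg (by omega : ¬ q ≤ limit)]
    exact ih (fun p hp => h p (by simp [hp])) n

theorem count_shift (limit : Int) (ps : List Int) : ∀ n : Int,
    ps.foldl (fun n p => if p ≤ limit then n + 1 else n) n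
      = n + ps.foldl (fun n p => if p ≤ limit then n + 1 else n) 0 := by
  induction ps with
  | nil => intro n; simp
  | cons q t ih =>
    intro n
    by_cases h : q ≤ limit
    · simp only [List.foldl_cons, if_pos h]
      rw [ih (n + 1), ih (0 + 1)]
      ring
    · simp only [List.foldl_cons, if_neg h]
      exact ih n

theorem count_nonneg (limit : Int) (ps : List Int) :
    (0 : Int) ≤ ps.foldl (fun n p => if p ≤ limit then n + 1 else n) 0 := by
  induction ps with
  | nil => simp
  | cons q t ih =>
    simp only [List.foldl_cons]
    rw [count_shift limit t (if q ≤ limit then 0 + 1 else 0)]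
    split_ifs <;> omega

theorem count_le_length (limit : Int) (ps : List Int) :
    ps.foldl (fun n p => if p ≤ limit then n + 1 else n) (0 : Int) ≤ ps.length := by
  induction ps with
  | nil => simp
  | cons q t ih =>
    simp only [List.foldl_cons, List.length_cons]
    rw [count_shift limit t (if q ≤ limit then 0 + 1 else 0)]
    split_ifs <;> push_cast <;> omega

-- the scan-and-break loop computed from the prefix table
theorem truncAux_eq (limit : Int) (lines : List String) : ∀ c : Int,
    truncAux limit lines c =
      (PySem.List.slice lines none (some ((pfx c lines).foldl (fun n p => if p ≤ limit then n + 1 else n) (0 : Int))),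
       (if (pfx c lines).foldl (fun n p => if p ≤ limit then n + 1 else n) (0 : Int) = 0 then c
        else PySem.List.pyGetD (pfx c lines) ((pfx c lines).foldl (fun n p => if p ≤ limit then n + 1 else n) (0 : Int) - 1) 0),
       (pfx c lines).foldl (fun n p => if p ≤ limit then n + 1 else n) (0 : Int)) := by
  induction lines with
  | nil => intro c; simp [truncAux, pfx, PySem.List.slice_to]
  | cons l rest ih =>
    intro c
    set c' := c + PySem.Str.len l + 1 with hc'
    by_cases hbig : c' > limit
    · have hall : ∀ p ∈ pfx c (l :: rest), limit < p := by
        intro p hp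
        simp only [pfx, List.mem_cons] at hp
        rcases hp with h | h
        · omega
        · have := mem_pfx_gt h; omega
      have hk : (pfx c (l :: rest)).foldl (fun n p => if p ≤ limit then n + 1 else n) (0 : Int) = 0 :=
        count_of_all_gt limit _ hall 0
      rw [hk]
      simp only [truncAux, if_pos (by omega : c + PySem.Str.len l + 1 > limit)]
      simp [PySem.List.slice_to]
    · -- line fits
      have hle : c' ≤ limit := by omega
      have hk : (pfx c (l :: rest)).foldl (fun n p => if p ≤ limit then n + 1 else n) (0 : Int)
          = 1 + (pfx c' rest).foldl (fun n p => if p ≤ limit then n + 1 else n) (0 : Int) := by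
        simp only [pfx, List.foldl_cons, if_pos hle, ← hc']
        rw [count_shift limit _ (0 + 1)]
        ring
      set k' := (pfx c' rest).foldl (fun n p => if p ≤ limit then n + 1 else n) (0 : Int) with hk'
      have hk'0 : (0 : Int) ≤ k' := count_nonneg limit _
      rw [hk]
      simp only [truncAux]
      rw [if_neg hbig, ih c']
      have hslice : PySem.List.slice (l :: rest) none (some (1 + k'))
          = l :: PySem.List.slice rest none (some k') := by
        rw [PySem.List.slice_to (l :: rest) (show (0:Int) ≤ 1 + k' by omega),
            PySem.List.slice_to rest hk'0]
        rw [show (1 + k').toNat = k'.toNat + 1 by omega]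
        rfl
      have hne : ¬ (1 + k' = 0) := by omega
      have hget : PySem.List.pyGetD (pfx c (l :: rest)) (1 + k' - 1) 0
          = if k' = 0 then c' else PySem.List.pyGetD (pfx c' rest) (k' - 1) 0 := by
        have he : (1 + k' - 1 : Int) = ((k'.toNat : Int)) := by omega
        rw [he]
        simp only [pfx, ← hc', PySem.List.pyGetD_natCast]
        by_cases h0 : k' = 0
        · simp [h0]
        · rw [if_neg h0]
          rcases Nat.exists_eq_succ_of_ne_zero (by omega : k'.toNat ≠ 0) with ⟨m, hm⟩
          have he2 : (k' - 1 : Int) = ((m : Int)) := by omega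
          rw [he2, PySem.List.pyGetD_natCast, hm]
          simp [List.getD]
      rw [hslice]
      simp only [if_neg hne]
      rw [hget]
      simp only [Prod.mk.injEq]
      refine ⟨rfl, rfl, by ring⟩

-- ===== VERDICT (by name: the statement is the Claim_ definition above) =====
theorem truncate_result_spec : Claim_equal_truncate_result := by
  intro result limit _
  unfold Spec_truncate_result truncate_result truncate_result_alt
  dsimp only
  by_cases hsmall : PySem.Str.len result ≤ limit
  · rw [if_pos hsmall, if_pos hsmall]
  · rw [if_neg hsmall, if_neg hsmall]
    rw [truncAux_eq limit ((PySem.Str.split? result "\n").getD []) 0, altPrefix_eq_pfx]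
    set lines := (PySem.Str.split? result "\n").getD [] with hlines
    set k := (pfx 0 lines).foldl (fun n p => if p ≤ limit then n + 1 else n) (0 : Int) with hk
    by_cases h0 : k = 0
    · -- degenerate branch on both sides
      have hsl : PySem.List.slice lines none (some k) = [] := by
        rw [h0, PySem.List.slice_to lines (show (0:Int) ≤ 0 by omega)]
        simp
      rw [hsl, if_pos rfl, if_neg (not_not_intro h0), if_pos h0]
    · have hkpos : (0 : Int) < k := by
        have := count_nonneg limit (pfx 0 lines); omega
      have hlen : k ≤ (pfx 0 lines).length := count_le_length limit (pfx 0 lines)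
      have hlnil : lines ≠ [] := by
        intro h
        have h2 : pfx 0 lines = [] := by rw [h]; rfl
        rw [hk, h2] at h0
        simp at h0
      have hne : PySem.List.slice lines none (some k) ≠ [] := by
        rw [PySem.List.slice_to lines (show (0:Int) ≤ k by omega)]
        have hpl := pfx_length lines 0
        intro habs
        rcases List.take_eq_nil_iff.mp habs with h | h
        · omega
        · exact hlnil h
      rw [if_neg hne, if_pos h0, if_neg h0]
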